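-- pv_equiv track=rewrite | github.com/349gill/competitive-programming | problem-sets/leetcode/323.py | dfs
-- ===== SOURCE A (Python) =====
-- def dfs(start, edges, found_nodes):
--     stack = []
--     visited = set()
--
--     stack.append(start)
--     while len(stack) != 0:
--         current = stack.pop()
--         if current not in visited:
--             visited.add(current)
--             for edge in edges:
--                 if (edge[0] == current and edge[1] not in visited):
--                     stack.append(edge[1])
--                 elif (edge[1] == current and edge[0] not in visited):
--                     stack.append(edge[0])
--
--     return visited.union(found_nodes)
-- ===== SOURCE B (Python) =====
-- def dfs(start, edges, found_nodes):
--     adj = {}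
--     for edge in edges:
--         a, b = edge[0], edge[1]
--         adj.setdefault(a, []).append(b)
--         adj.setdefault(b, []).append(a)
--     visited = set()
--     stack = [start]
--     while stack:
--         current = stack.pop()
--         if current not in visited:
--             visited.add(current)
--             for n in adj.get(current, []):
--                 if n not in visited:
--                     stack.append(n)
--     return visited.union(found_nodes)
-- ===== Notes on version B (the rewrite author's own statement) =====
-- stated objective: idiomatic
-- what changed: B builds an adjacency-list dict once and then runs the standard stack DFS over precomputed neighbour lists, instead of A's rescan of the whole edge list at every visited node.
import Mathlib
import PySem

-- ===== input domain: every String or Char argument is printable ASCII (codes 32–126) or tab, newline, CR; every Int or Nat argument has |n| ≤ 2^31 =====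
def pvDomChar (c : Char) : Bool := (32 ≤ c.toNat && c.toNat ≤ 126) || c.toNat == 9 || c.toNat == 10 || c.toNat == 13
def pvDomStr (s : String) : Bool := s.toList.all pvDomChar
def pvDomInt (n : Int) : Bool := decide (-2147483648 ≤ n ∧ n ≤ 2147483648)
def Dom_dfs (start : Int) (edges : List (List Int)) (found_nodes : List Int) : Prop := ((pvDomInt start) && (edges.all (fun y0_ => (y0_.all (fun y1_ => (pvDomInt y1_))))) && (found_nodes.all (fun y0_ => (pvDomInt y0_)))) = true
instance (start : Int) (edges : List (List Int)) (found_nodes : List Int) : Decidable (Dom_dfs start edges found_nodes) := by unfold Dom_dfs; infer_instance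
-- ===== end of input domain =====

-- B builds an adjacency-list dict once and runs the same stack DFS over it, instead of A's
-- rescan of the whole edge list at every visited node; return value only (no argument is mutated).

-- termination measure shared by both loops: (#unvisited candidate nodes, stack length)
def pvUnvis (pool stack visited : List Int) : Nat :=
  ((pool ++ stack).filter (fun x => decide (x ∉ visited))).toFinset.card

-- skip case: measure component 1 is unchanged when the popped node is already visited
theorem pvUnvis_skip (pool rest visited : List Int) (c : Int) (hc : c ∈ visited) :
    pvUnvis pool rest visited = pvUnvis pool (c :: rest) visited := by
  unfold pvUnvis
  congr 1
  simp [List.filter_append, hc]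

-- visit case: marking the popped node visited strictly shrinks measure component 1
theorem pvUnvis_visit (pool rest pushes visited : List Int) (c : Int)
    (hc : c ∉ visited) (hp : ∀ x ∈ pushes, x ∈ pool) :
    pvUnvis pool (pushes ++ rest) (visited ++ [c]) < pvUnvis pool (c :: rest) visited := by
  unfold pvUnvis
  have hcmem : c ∈ ((pool ++ c :: rest).filter (fun x => decide (x ∉ visited))).toFinset := by
    simp [hc]
  have hsub : ((pool ++ (pushes ++ rest)).filter (fun x => decide (x ∉ visited ++ [c]))).toFinset ⊆
      (((pool ++ c :: rest).filter (fun x => decide (x ∉ visited))).toFinset).erase c := by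
    intro x hx
    simp only [List.mem_toFinset, List.mem_filter, List.mem_append, List.mem_cons,
      decide_eq_true_eq, Finset.mem_erase] at hx ⊢
    rcases hx with ⟨hmem, hnv⟩
    push_neg at hnv
    refine ⟨hnv.2.1, ?_, hnv.1⟩
    rcases hmem with h | h | h
    · exact Or.inl h
    · exact Or.inl (hp x h)
    · exact Or.inr (Or.inr h)
  have h1 := Finset.card_le_card hsub
  have h2 := Finset.card_erase_of_mem hcmem
  have h3 := Finset.card_pos.mpr ⟨c, hcmem⟩
  omega

-- ===== PORT A =====
-- the inner 'for edge in edges' loop of A, pushing onto the stack (top = list head);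
-- an edge shorter than 2 raises IndexError in Python: excluded by Pre_dfs, here skipped
def pvPushA (edges : List (List Int)) (c : Int) (v : PySem.Set Int) (rest : List Int) : List Int :=
  edges.foldl (fun st e =>
    match e with
    | e0 :: e1 :: _ =>
      if e0 = c ∧ e1 ∉ v then e1 :: st
      else if e1 = c ∧ e0 ∉ v then e0 :: st
      else st
    | _ => st) rest

-- the raw neighbour list of c among the edges, in edge order (used by the proofs and by B)
def pvRaw (edges : List (List Int)) (c : Int) : List Int :=
  edges.flatMap (fun e =>
    match e with
    | e0 :: e1 :: _ => (if e0 = c then [e1] else []) ++ (if e1 = c then [e0] else [])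
    | _ => [])

theorem pvRaw_sub (edges : List (List Int)) (c x : Int) (hx : x ∈ pvRaw edges c) :
    x ∈ edges.flatten := by
  simp only [pvRaw, List.mem_flatMap] at hx
  obtain ⟨e, he, hxe⟩ := hx
  rw [List.mem_flatten]
  refine ⟨e, he, ?_⟩
  match e with
  | [] => simp at hxe
  | [e0] => simp at hxe
  | e0 :: e1 :: tl =>
    rcases List.mem_append.1 hxe with h | h <;> split_ifs at h <;> simp_all

-- A's per-visit scan equals the reversed filtered raw neighbour list (c already visited)
theorem pvPushA_eq (edges : List (List Int)) (c : Int) (v : PySem.Set Int) (hcv : c ∈ v) :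
    ∀ rest : List Int,
      pvPushA edges c v rest = ((pvRaw edges c).filter (fun n => decide (n ∉ v))).reverse ++ rest := by
  induction edges with
  | nil => intro rest; simp [pvPushA, pvRaw]
  | cons e es ih =>
    intro rest
    simp only [pvPushA, List.foldl_cons] at ih ⊢
    simp only [pvRaw, List.flatMap_cons, List.filter_append, List.reverse_append,
      List.append_assoc]
    rw [ih]
    congr 1
    match e with
    | [] => simp
    | [e0] => simp
    | e0 :: e1 :: tl =>
      by_cases h0 : e0 = c <;> by_cases h1 : e1 = c <;>
        by_cases hv1 : e1 ∈ v <;> by_cases hv0 : e0 ∈ v <;>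
        simp_all

def dfsLoopA (edges : List (List Int)) (stack : List Int) (visited : PySem.Set Int) : PySem.Set Int :=
  match stack with
  | [] => visited
  | c :: rest =>
    if c ∈ visited then dfsLoopA edges rest visited
    else dfsLoopA edges (pvPushA edges c (PySem.Set.add visited c) rest) (PySem.Set.add visited c)
termination_by (pvUnvis edges.flatten stack visited, stack.length)
decreasing_by
  · rename_i hc
    rw [pvUnvis_skip _ _ _ _ hc]
    exact Prod.Lex.right _ (Nat.lt_succ_self _)
  · rename_i hc
    apply Prod.Lex.left
    have hadd : PySem.Set.add visited c = visited ++ [c] := by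
      simp [PySem.Set.add, PySem.Set.contains, hc]
    have hcv : c ∈ PySem.Set.add visited c := by rw [hadd]; simp
    rw [pvPushA_eq edges c _ hcv rest, hadd]
    apply pvUnvis_visit _ _ _ _ _ hc
    intro x hx
    rw [List.mem_reverse, List.mem_filter] at hx
    exact pvRaw_sub edges c x hx.1

def dfs (start : Int) (edges : List (List Int)) (found_nodes : List Int) : List Int :=
  PySem.Set.union (dfsLoopA edges [start] PySem.Set.empty) found_nodes

-- ===== PORT B =====
-- adjacency dict: adj.setdefault(a, []).append(b) is Dict.modify a [] (· ++ [b])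
def pvAdj (edges : List (List Int)) : PySem.Dict Int (List Int) :=
  edges.foldl (fun d e =>
    match e with
    | e0 :: e1 :: _ => (d.modify e0 [] (· ++ [e1])).modify e1 [] (· ++ [e0])
    | _ => d) PySem.Dict.empty

-- any looked-up neighbour comes from the dict's stored values
theorem pv_getD_sub (adj : PySem.Dict Int (List Int)) (c x : Int)
    (hx : x ∈ adj.getD c []) : x ∈ adj.values.flatten := by
  rw [PySem.Dict.getD_eq_get?_getD] at hx
  cases hg : adj.get? c with
  | none => rw [hg] at hx; simp at hx
  | some l =>
    rw [hg] at hx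
    simp only [Option.getD_some] at hx
    have hmem := PySem.Dict.mem_items_of_get?_eq_some adj hg
    rw [List.mem_flatten]
    refine ⟨l, ?_, hx⟩
    simp only [PySem.Dict.values, List.mem_map]
    exact ⟨(c, l), hmem, rfl⟩

-- the inner 'for n in adj.get(current, [])' loop of B
def pvPushB (ns : List Int) (v : PySem.Set Int) (rest : List Int) : List Int :=
  ns.foldl (fun st n => if n ∉ v then n :: st else st) rest

theorem pvPushB_eq (ns : List Int) (v : PySem.Set Int) :
    ∀ rest : List Int, pvPushB ns v rest = (ns.filter (fun n => decide (n ∉ v))).reverse ++ rest := by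
  induction ns with
  | nil => intro rest; simp [pvPushB]
  | cons n ns ih =>
    intro rest
    simp only [pvPushB, List.foldl_cons, List.filter_cons] at ih ⊢
    by_cases h : n ∈ v
    · rw [if_neg (fun hn => hn h), if_neg (by simp [h]), ih]
    · rw [if_pos h, if_pos (by simp [h]), ih]
      simp

def dfsLoopB (adj : PySem.Dict Int (List Int)) (stack : List Int) (visited : PySem.Set Int) : PySem.Set Int :=
  match stack with
  | [] => visited
  | c :: rest =>
    if c ∈ visited then dfsLoopB adj rest visited
    else dfsLoopB adj (pvPushB (adj.getD c []) (PySem.Set.add visited c) rest) (PySem.Set.add visited c)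
termination_by (pvUnvis adj.values.flatten stack visited, stack.length)
decreasing_by
  · rename_i hc
    rw [pvUnvis_skip _ _ _ _ hc]
    exact Prod.Lex.right _ (Nat.lt_succ_self _)
  · rename_i hc
    apply Prod.Lex.left
    have hadd : PySem.Set.add visited c = visited ++ [c] := by
      simp [PySem.Set.add, PySem.Set.contains, hc]
    rw [pvPushB_eq _ _ rest, hadd]
    apply pvUnvis_visit _ _ _ _ _ hc
    intro x hx
    rw [List.mem_reverse, List.mem_filter] at hx
    exact pv_getD_sub adj c x hx.1

def dfs_alt (start : Int) (edges : List (List Int)) (found_nodes : List Int) : List Int :=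
  PySem.Set.union (dfsLoopB (pvAdj edges) [start] PySem.Set.empty) found_nodes

-- ===== PRECONDITION & SPEC =====
-- Pre_ excludes exactly the inputs containing an edge with fewer than two endpoints,
-- on which A raises IndexError (the first visited node scans every edge).
def Pre_dfs (start : Int) (edges : List (List Int)) (found_nodes : List Int) : Prop :=
  ∀ e ∈ edges, 2 ≤ e.length
instance (start : Int) (edges : List (List Int)) (found_nodes : List Int) : Decidable (Pre_dfs start edges found_nodes) := by unfold Pre_dfs; infer_instance

def pvWitness_dfs : Int × List (List Int) × List Int := (0, [[0, 1], [1, 2]], [5])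

def Spec_dfs (start : Int) (edges : List (List Int)) (found_nodes : List Int) (out : List Int) : Prop := out = dfs_alt start edges found_nodes
instance (start : Int) (edges : List (List Int)) (found_nodes : List Int) (out : List Int) : Decidable (Spec_dfs start edges found_nodes out) := by unfold Spec_dfs; infer_instance

-- ===== CLAIM (what is proved, stated in full; the proofs are below) =====
def Claim_equal_dfs : Prop := ∀ (start : Int) (edges : List (List Int)) (found_nodes : List Int), Dom_dfs start edges found_nodes → Pre_dfs start edges found_nodes → Spec_dfs start edges found_nodes (dfs start edges found_nodes)

-- ===== LEMMAS AND PROOFS =====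

-- pvAdj records exactly the raw neighbour list for every node
theorem pvAdj_getD_aux (edges : List (List Int)) (c : Int) :
    ∀ d : PySem.Dict Int (List Int),
      (edges.foldl (fun d e =>
        match e with
        | e0 :: e1 :: _ => (d.modify e0 [] (· ++ [e1])).modify e1 [] (· ++ [e0])
        | _ => d) d).getD c [] = d.getD c [] ++ pvRaw edges c := by
  induction edges with
  | nil => intro d; simp [pvRaw]
  | cons e es ih =>
    intro d
    match e with
    | [] => simpa [pvRaw, List.flatMap_cons] using ih d
    | [e0] => simpa [pvRaw, List.flatMap_cons] using ih d
    | e0 :: e1 :: tl =>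
      simp only [List.foldl_cons]
      rw [ih]
      have hstep : ((d.modify e0 [] (· ++ [e1])).modify e1 [] (· ++ [e0])).getD c [] =
          d.getD c [] ++ ((if e0 = c then [e1] else []) ++ (if e1 = c then [e0] else [])) := by
        rw [PySem.Dict.getD_modify, PySem.Dict.getD_modify]
        by_cases h1 : c = e1 <;> by_cases h0 : c = e0
        · subst h1; subst h0; simp
        · subst h1; simp [h0, Ne.symm h0]
        · subst h0; simp [h1, Ne.symm h1]
        · simp [PySem.Dict.getD_modify, h0, h1, Ne.symm h0, Ne.symm h1]
      rw [hstep]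
      simp only [pvRaw, List.flatMap_cons]
      simp [List.append_assoc]

theorem pvAdj_getD (edges : List (List Int)) (c : Int) :
    (pvAdj edges).getD c [] = pvRaw edges c := by
  simpa [PySem.Dict.getD_empty] using pvAdj_getD_aux edges c PySem.Dict.empty

-- the two loops agree: A's edge scan produces B's filtered adjacency list
theorem pvLoop_eq (edges : List (List Int)) :
    ∀ (stack : List Int) (visited : PySem.Set Int),
      dfsLoopA edges stack visited = dfsLoopB (pvAdj edges) stack visited := by
  intro stack visited
  fun_induction dfsLoopA edges stack visited with
  | case1 visited => rw [dfsLoopB]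
  | case2 visited c rest hc ih =>
    rw [dfsLoopB]
    simp only [if_pos hc]
    exact ih
  | case3 visited c rest hc ih =>
    rw [dfsLoopB]
    simp only [if_neg hc]
    have hadd : PySem.Set.add visited c = visited ++ [c] := by
      simp [PySem.Set.add, PySem.Set.contains, hc]
    have hcv : c ∈ PySem.Set.add visited c := by rw [hadd]; simp
    rw [pvPushA_eq edges c _ hcv rest] at ih ⊢
    rw [pvPushB_eq _ _ rest, pvAdj_getD]
    exact ih

-- ===== VERDICT (by name: the statement is the Claim_ definition above) =====
theorem dfs_spec : Claim_equal_dfs := by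
  intro start edges found_nodes _hdom _hpre
  unfold Spec_dfs dfs dfs_alt
  rw [pvLoop_eq]
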